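-- pv_equiv track=rewrite | github.com/Pritz69/GFG_POTD | Reversing_The_Equation.py | reverseEqn
-- ===== SOURCE A (Python) =====
-- def reverseEqn(s):
--     # code here
--     c=[]
--     o=[]
--     n=''
--     for x in s :
--         if x not in "+-/*" :
--             n += x
--         else :
--             c.append(n)
--             n =''
--             o.append(x)
--     c.append(n)
--     ans =''
--     while c :
--         ans += c.pop()
--         if o :
--             ans += o.pop()
--     return ans
-- ===== SOURCE B (Python) =====
-- def reverseEqn(s):
--     tokens = []
--     cur = []
--     for x in s:
--         if x in "+-/*":
--             tokens += [''.join(cur), x]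
--             cur = []
--         else:
--             cur.append(x)
--     tokens.append(''.join(cur))
--     return ''.join(reversed(tokens))
-- ===== Notes on version B (the rewrite author's own statement) =====
-- stated objective: simpler
-- what changed: B builds one flat token list (operands and operators in order) in a single pass and returns join(reversed(tokens)), replacing A's two parallel stacks and its second interleaving pop-from-the-end loop.
import Mathlib
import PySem

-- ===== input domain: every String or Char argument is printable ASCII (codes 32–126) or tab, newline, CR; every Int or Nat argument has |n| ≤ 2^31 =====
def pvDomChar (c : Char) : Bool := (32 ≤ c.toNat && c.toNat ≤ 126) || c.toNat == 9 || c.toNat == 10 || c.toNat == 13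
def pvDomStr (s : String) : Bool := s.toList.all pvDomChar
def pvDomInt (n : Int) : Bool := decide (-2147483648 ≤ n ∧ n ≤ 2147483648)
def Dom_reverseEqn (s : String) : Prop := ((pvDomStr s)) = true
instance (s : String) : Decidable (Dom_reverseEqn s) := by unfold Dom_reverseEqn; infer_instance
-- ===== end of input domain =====

-- B replaces A's two parallel stacks + interleaving pop loop by one flat token list, reversed and joined (simpler decomposition, same O(n) cost).

-- 'x in "+-/*"' on a single char = membership among these four chars (exact: x has length 1)
def pvIsOp (x : Char) : Bool := x == '+' || x == '-' || x == '/' || x == '*'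

-- ===== PORT A =====
-- the for-loop: builds operand stack c, operator stack o, current operand n
def pvScanA : List Char → List (List Char) → List Char → List Char → List (List Char) × List Char
  | [], c, o, n => (c ++ [n], o)
  | x :: xs, c, o, n =>
    if !pvIsOp x then pvScanA xs c o (n ++ [x])
    else pvScanA xs (c ++ [n]) (o ++ [x]) []

-- 'while c: ans += c.pop(); if o: ans += o.pop()' — pop-from-the-end loop, encoded as
-- structural recursion over the two REVERSED lists (the head of the reverse is the popped element)
def pvPopA : List (List Char) → List Char → List Char → List Char
  | [], _, ans => ans
  | n :: c, [], ans => pvPopA c [] (ans ++ n)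
  | n :: c, op :: o, ans => pvPopA c o (ans ++ n ++ [op])

def reverseEqn (s : String) : String :=
  let co := pvScanA s.toList [] [] []
  String.ofList (pvPopA co.1.reverse co.2.reverse [])

-- ===== PORT B =====
-- the for-loop over (tokens=acc, cur); "tokens += [''.join(cur), x]" / "cur.append(x)"; final "tokens.append(''.join(cur))"
def pvTokB : List Char → List (List Char) → List Char → List (List Char)
  | [], acc, cur => acc ++ [cur]
  | x :: xs, acc, cur =>
    if pvIsOp x then pvTokB xs (acc ++ [cur, [x]]) []
    else pvTokB xs acc (cur ++ [x])

def reverseEqn_alt (s : String) : String :=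
  String.ofList ((pvTokB s.toList [] []).reverse.flatten)

-- ===== PRECONDITION & SPEC =====
def Spec_reverseEqn (s : String) (out : String) : Prop := out = reverseEqn_alt s
instance (s : String) (out : String) : Decidable (Spec_reverseEqn s out) := by unfold Spec_reverseEqn; infer_instance

-- ===== CLAIM (what is proved, stated in full; the proofs are below) =====
def Claim_equal_reverseEqn : Prop := ∀ (s : String), Dom_reverseEqn s → Spec_reverseEqn s (reverseEqn s)

-- ===== LEMMAS AND PROOFS =====

-- interleaving of operands and operators (the value A's pop loop produces)
def pvItl : List (List Char) → List Char → List Char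
  | [], _ => []
  | n :: c, [] => n ++ pvItl c []
  | n :: c, op :: o => n ++ op :: pvItl c o

-- the alternating token list (the value B's loop produces)
def pvZip2 : List (List Char) → List Char → List (List Char)
  | [], _ => []
  | n :: c, [] => n :: pvZip2 c []
  | n :: c, op :: o => n :: [op] :: pvZip2 c o

theorem pvPopA_itl : ∀ (c : List (List Char)) (o ans : List Char),
    pvPopA c o ans = ans ++ pvItl c o := by
  intro c
  induction c with
  | nil => intro o ans; cases o <;> simp [pvPopA, pvItl]
  | cons n c ih =>
    intro o ans
    cases o with
    | nil => simp [pvPopA, pvItl, ih]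
    | cons op o => simp [pvPopA, pvItl, ih]

theorem pvScanA_acc : ∀ (xs : List Char) (c : List (List Char)) (o n : List Char),
    pvScanA xs c o n = (c ++ (pvScanA xs [] [] n).1, o ++ (pvScanA xs [] [] n).2) := by
  intro xs
  induction xs with
  | nil => intro c o n; simp [pvScanA]
  | cons x xs ih =>
    intro c o n
    by_cases h : pvIsOp x = true
    · simp only [pvScanA, h, Bool.not_true, Bool.false_eq_true, if_false, List.nil_append]
      rw [ih (c ++ [n]) (o ++ [x]) [], ih [n] [x] []]
      simp
    · simp only [Bool.not_eq_true] at h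
      simp [pvScanA, h, ih c o (n ++ [x])]

theorem pvTokB_acc : ∀ (xs : List Char) (acc : List (List Char)) (cur : List Char),
    pvTokB xs acc cur = acc ++ pvTokB xs [] cur := by
  intro xs
  induction xs with
  | nil => intro acc cur; simp [pvTokB]
  | cons x xs ih =>
    intro acc cur
    by_cases h : pvIsOp x = true
    · simp only [pvTokB, h, if_pos, List.nil_append]
      rw [ih (acc ++ [cur, [x]]) [], ih [cur, [x]] []]
      simp
    · simp [pvTokB, h, ih acc (cur ++ [x])]

theorem pvTokB_zip : ∀ (xs n : List Char),
    pvTokB xs [] n = pvZip2 (pvScanA xs [] [] n).1 (pvScanA xs [] [] n).2 := by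
  intro xs
  induction xs with
  | nil => intro n; simp [pvTokB, pvScanA, pvZip2]
  | cons x xs ih =>
    intro n
    by_cases h : pvIsOp x = true
    · simp only [pvTokB, pvScanA, h, Bool.not_true, if_pos, Bool.false_eq_true, if_false,
        List.nil_append]
      rw [pvTokB_acc xs [n, [x]] [], pvScanA_acc xs [n] [x] [], ih []]
      simp [pvZip2]
    · simp only [Bool.not_eq_true] at h
      simp [pvTokB, pvScanA, h, ih (n ++ [x])]

theorem pvScanA_len : ∀ (xs n : List Char),
    (pvScanA xs [] [] n).1.length = (pvScanA xs [] [] n).2.length + 1 := by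
  intro xs
  induction xs with
  | nil => intro n; simp [pvScanA]
  | cons x xs ih =>
    intro n
    by_cases h : pvIsOp x = true
    · simp only [pvScanA, h, Bool.not_true, Bool.false_eq_true, if_false, List.nil_append]
      rw [pvScanA_acc xs [n] [x] []]
      simp [ih []]
    · simp only [Bool.not_eq_true] at h
      simp [pvScanA, h, ih (n ++ [x])]

theorem pvItl_append : ∀ (Y : List Char) (X : List (List Char)) (n : List Char) (op : Char),
    X.length = Y.length + 1 →
    pvItl (X ++ [n]) (Y ++ [op]) = pvItl X Y ++ op :: n := by
  intro Y
  induction Y with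
  | nil =>
    intro X n op hl
    match X, hl with
    | [x], _ => simp [pvItl]
  | cons y Y ih =>
    intro X n op hl
    match X, hl with
    | x :: X, hl =>
      simp only [List.length_cons, Nat.add_right_cancel_iff] at hl ⊢
      simp [pvItl, ih X n op (by simpa using hl)]

theorem pvZip2_rev : ∀ (O : List Char) (C : List (List Char)),
    C.length = O.length + 1 →
    (pvZip2 C O).reverse.flatten = pvItl C.reverse O.reverse := by
  intro O
  induction O with
  | nil =>
    intro C hl
    match C, hl with
    | [c0], _ => simp [pvZip2, pvItl]
  | cons op O ih =>
    intro C hl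
    match C, hl with
    | n :: C, hl =>
      simp only [List.length_cons, Nat.add_right_cancel_iff] at hl
      have h1 : C.reverse.length = O.reverse.length + 1 := by simpa using hl
      simp only [pvZip2, List.reverse_cons, List.flatten_append, List.flatten_cons,
        List.flatten_nil, List.append_nil]
      rw [ih C (by simpa using hl), pvItl_append O.reverse C.reverse n op h1]
      simp

-- ===== VERDICT (by name: the statement is the Claim_ definition above) =====
theorem reverseEqn_spec : Claim_equal_reverseEqn := by
  intro s _
  unfold Spec_reverseEqn reverseEqn reverseEqn_alt
  show String.ofList (pvPopA (pvScanA s.toList [] [] []).1.reverse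
      (pvScanA s.toList [] [] []).2.reverse []) = _
  rw [pvPopA_itl, pvTokB_zip,
    pvZip2_rev (pvScanA s.toList [] [] []).2 (pvScanA s.toList [] [] []).1
      (pvScanA_len s.toList [])]
  simp
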